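-- pv_equiv track=rewrite | github.com/mangtronix/MusicDevices | docs/generate_particles_sprites.py | explosion_tile
-- ===== SOURCE A (Python) =====
-- import math
--
-- TILE   = 32        # tile width and height in pixels
--
-- BG    = 0    # black
--
-- WHITE = 1    # (255, 255, 255)
--
-- def blank():
--     return [[BG] * TILE for _ in range(TILE)]
--
-- def px(tile, x, y, c):
--     if 0 <= x < TILE and 0 <= y < TILE:
--         tile[y][x] = c
--
-- def explosion_tile(c1, c2, c3):
--     """
--     Concentric filled rings fading outward, plus 4 cardinal rays and
--     4 diagonal sparkles. Looks like a shockwave blast.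
--     """
--     t = blank()
--     cx, cy = 15, 15
--
--     for y in range(TILE):
--         for x in range(TILE):
--             dx, dy = x - cx, y - cy
--             r = math.sqrt(dx * dx + dy * dy)
--             if r <= 2:
--                 t[y][x] = WHITE
--             elif r <= 6:
--                 t[y][x] = c1
--             elif r <= 10:
--                 t[y][x] = c2
--             elif r <= 13:
--                 t[y][x] = c3
--
--     # Cardinal rays: single-pixel lines from ring edge to tile edge
--     for i in range(14, 16):
--         px(t, cx + i, cy,     c1)
--         px(t, cx - i, cy,     c1)
--         px(t, cx,     cy + i, c1)
--         px(t, cx,     cy - i, c1)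
--
--     # Diagonal sparkles
--     for i in range(10, 14):
--         d = int(i / math.sqrt(2))
--         px(t, cx + d, cy - d, c2)
--         px(t, cx - d, cy - d, c2)
--         px(t, cx + d, cy + d, c2)
--         px(t, cx - d, cy + d, c2)
--
--     return t
-- ===== SOURCE B (Python) =====
-- import math
--
-- TILE = 32
-- BG = 0
-- WHITE = 1
--
-- def blank():
--     return [[BG] * TILE for _ in range(TILE)]
--
-- def px(tile, x, y, c):
--     if 0 <= x < TILE and 0 <= y < TILE:
--         tile[y][x] = c
--
-- def _filled_disk(t, cx, cy, r2, c):
--     # paint every pixel whose squared distance from (cx, cy) is <= r2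
--     for y in range(TILE):
--         for x in range(TILE):
--             if (x - cx) * (x - cx) + (y - cy) * (y - cy) <= r2:
--                 t[y][x] = c
--
-- def explosion_tile(c1, c2, c3):
--     """
--     Concentric filled rings fading outward, plus 4 cardinal rays and
--     4 diagonal sparkles. Looks like a shockwave blast.
--     """
--     t = blank()
--     cx, cy = 15, 15
--
--     # Rings: four concentric filled disks, outermost first, inner overwrites outer.
--     # Squared-radius thresholds; no floating point needed.
--     for r2, c in ((13 * 13, c3), (10 * 10, c2), (6 * 6, c1), (2 * 2, WHITE)):
--         _filled_disk(t, cx, cy, r2, c)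
--
--     # Cardinal rays
--     for i in range(14, 16):
--         for x, y in ((cx + i, cy), (cx - i, cy), (cx, cy + i), (cx, cy - i)):
--             px(t, x, y, c1)
--
--     # Diagonal sparkles; isqrt(i*i // 2) == int(i / sqrt(2)) on this range
--     for i in range(10, 14):
--         d = math.isqrt(i * i // 2)
--         for x, y in ((cx + d, cy - d), (cx - d, cy - d), (cx + d, cy + d), (cx - d, cy + d)):
--             px(t, x, y, c2)
--
--     return t
-- ===== Notes on version B (the rewrite author's own statement) =====
-- stated objective: alternative
-- what changed: Replaces the per-pixel if/elif float-sqrt band classifier by painting four concentric filled disks outermost-first (inner pass overwrites outer), using integer squared-radius tests and math.isqrt instead of floating point; rays and sparkles become small coordinate-tuple loops.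
import Mathlib
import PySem

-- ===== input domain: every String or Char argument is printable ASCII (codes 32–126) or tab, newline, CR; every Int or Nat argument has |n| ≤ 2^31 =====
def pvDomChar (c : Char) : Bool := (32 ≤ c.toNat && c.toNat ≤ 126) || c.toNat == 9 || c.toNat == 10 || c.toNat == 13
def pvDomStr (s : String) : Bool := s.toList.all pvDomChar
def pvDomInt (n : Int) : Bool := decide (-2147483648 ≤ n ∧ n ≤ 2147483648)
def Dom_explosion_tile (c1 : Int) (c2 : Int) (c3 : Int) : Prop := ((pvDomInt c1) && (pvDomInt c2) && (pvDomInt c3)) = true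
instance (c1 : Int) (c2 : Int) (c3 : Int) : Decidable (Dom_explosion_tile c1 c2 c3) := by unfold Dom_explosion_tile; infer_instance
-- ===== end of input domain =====

-- B paints the rings as four concentric filled disks outermost-first (inner overwrites outer)
-- with integer squared-radius tests instead of A's per-pixel float-sqrt if/elif classifier;
-- equal return value proved for all inputs (objective: alternative decomposition, not faster).


-- ===== PORT A =====
-- shared low-level helper: the Python statement `t[y][x] = c` (indices here are always
-- nonnegative and the row read-modify-write matches Python list mutation on the return value)
def pvSet2 (t : List (List Int)) (x y c : Int) : List (List Int) :=
  t.set y.toNat ((t.getD y.toNat []).set x.toNat c)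

-- helper px(tile, x, y, c)
def pvPx (t : List (List Int)) (x y c : Int) : List (List Int) :=
  if 0 ≤ x ∧ x < 32 ∧ 0 ≤ y ∧ y < 32 then pvSet2 t x y c else t

-- helper blank(): [[BG] * TILE for _ in range(TILE)]
def pvBlank : List (List Int) :=
  (PySem.List.pyRange 0 32 1).map (fun _ => List.replicate 32 (0 : Int))

-- A's per-pixel body; math.sqrt(d2) ≤ k ↔ d2 ≤ k*k, exact for these integer thresholds
def pvD2 (x y : Int) : Int := (x - 15) * (x - 15) + (y - 15) * (y - 15)

def pvPixStep (c1 c2 c3 y : Int) (t : List (List Int)) (x : Int) : List (List Int) :=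
  if pvD2 x y ≤ 4 then pvSet2 t x y 1
  else if pvD2 x y ≤ 36 then pvSet2 t x y c1
  else if pvD2 x y ≤ 100 then pvSet2 t x y c2
  else if pvD2 x y ≤ 169 then pvSet2 t x y c3
  else t

-- A's cardinal-ray loop body
def pvRayStep (c1 : Int) (t : List (List Int)) (i : Int) : List (List Int) :=
  pvPx (pvPx (pvPx (pvPx t (15 + i) 15 c1) (15 - i) 15 c1) 15 (15 + i) c1) 15 (15 - i) c1

-- A's sparkle body; int(i / math.sqrt(2)) = ⌊sqrt(i*i // 2)⌋ exactly for i ∈ [10, 14)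
-- floor square root of a nonnegative int (= math.isqrt): the number of j ≥ 1 with j*j ≤ n
def pvISqrt (n : Int) : Int := ((List.range n.toNat).countP (fun j => (j + 1) * (j + 1) ≤ n.toNat) : Nat)

-- int(i / math.sqrt(2)) = math.isqrt(i*i // 2) exactly for i ∈ [10, 14)
def pvSparkD (i : Int) : Int := pvISqrt (PySem.Int.floordiv (i * i) 2)

def pvSparkStep (c2 : Int) (t : List (List Int)) (i : Int) : List (List Int) :=
  pvPx (pvPx (pvPx (pvPx t (15 + pvSparkD i) (15 - pvSparkD i) c2)
    (15 - pvSparkD i) (15 - pvSparkD i) c2) (15 + pvSparkD i) (15 + pvSparkD i) c2)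
    (15 - pvSparkD i) (15 + pvSparkD i) c2

def explosion_tile (c1 : Int) (c2 : Int) (c3 : Int) : List (List Int) :=
  (PySem.List.pyRange 10 14 1).foldl (pvSparkStep c2)
    ((PySem.List.pyRange 14 16 1).foldl (pvRayStep c1)
      ((PySem.List.pyRange 0 32 1).foldl
        (fun t y => (PySem.List.pyRange 0 32 1).foldl (pvPixStep c1 c2 c3 y) t) pvBlank))

-- ===== PORT B =====
-- Source B blank()
def pvBlankB : List (List Int) :=
  (PySem.List.pyRange 0 32 1).map (fun _ => List.replicate 32 (0 : Int))

-- _filled_disk inner body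
def pvDiskStep (cx cy r2 c y : Int) (t : List (List Int)) (x : Int) : List (List Int) :=
  if (x - cx) * (x - cx) + (y - cy) * (y - cy) ≤ r2 then pvSet2 t x y c else t

-- helper _filled_disk(t, cx, cy, r2, c)
def pvFilledDisk (t : List (List Int)) (cx cy r2 c : Int) : List (List Int) :=
  (PySem.List.pyRange 0 32 1).foldl
    (fun t y => (PySem.List.pyRange 0 32 1).foldl (pvDiskStep cx cy r2 c y) t) t

-- B's ray body: fold px over the four coordinate pairs
def pvRayStepB (c1 : Int) (t : List (List Int)) (i : Int) : List (List Int) :=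
  [((15 : Int) + i, (15 : Int)), (15 - i, 15), (15, 15 + i), (15, 15 - i)].foldl
    (fun t p => pvPx t p.1 p.2 c1) t

-- B's sparkle body: d = math.isqrt(i*i // 2)
def pvSparkStepB (c2 : Int) (t : List (List Int)) (i : Int) : List (List Int) :=
  [((15 : Int) + pvSparkD i, (15 : Int) - pvSparkD i), (15 - pvSparkD i, 15 - pvSparkD i),
    (15 + pvSparkD i, 15 + pvSparkD i), (15 - pvSparkD i, 15 + pvSparkD i)].foldl
    (fun t p => pvPx t p.1 p.2 c2) t

def explosion_tile_alt (c1 : Int) (c2 : Int) (c3 : Int) : List (List Int) :=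
  (PySem.List.pyRange 10 14 1).foldl (pvSparkStepB c2)
    ((PySem.List.pyRange 14 16 1).foldl (pvRayStepB c1)
      ([((13 * 13 : Int), c3), (10 * 10, c2), (6 * 6, c1), (2 * 2, 1)].foldl
        (fun t rc => pvFilledDisk t 15 15 rc.1 rc.2) pvBlankB))

-- ===== PRECONDITION & SPEC =====
def Spec_explosion_tile (c1 : Int) (c2 : Int) (c3 : Int) (out : List (List Int)) : Prop := out = explosion_tile_alt c1 c2 c3
instance (c1 : Int) (c2 : Int) (c3 : Int) (out : List (List Int)) : Decidable (Spec_explosion_tile c1 c2 c3 out) := by unfold Spec_explosion_tile; infer_instance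

-- ===== CLAIM (what is proved, stated in full; the proofs are below) =====
def Claim_equal_explosion_tile : Prop := ∀ (c1 : Int) (c2 : Int) (c3 : Int), Dom_explosion_tile c1 c2 c3 → Spec_explosion_tile c1 c2 c3 (explosion_tile c1 c2 c3)

-- ===== LEMMAS AND PROOFS =====
-- Strategy: both tiles are obtained from the "code" tile (colors 2, 3, 4 standing for
-- c1, c2, c3) by substituting the actual colors; the code tiles are closed terms and equal
-- by `decide`.

-- the substitution of actual colors for the codes 2, 3, 4 (0 = BG and 1 = WHITE are fixed)
def pvSubst (c1 c2 c3 v : Int) : Int :=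
  if v = 2 then c1 else if v = 3 then c2 else if v = 4 then c3 else v

def pvMapT (f : Int → Int) (t : List (List Int)) : List (List Int) := t.map (List.map f)

theorem pvMapT_set2 (f : Int → Int) (t : List (List Int)) (x y c : Int) :
    pvMapT f (pvSet2 t x y c) = pvSet2 (pvMapT f t) x y (f c) := by
  simp [pvMapT, pvSet2, List.getD_eq_getElem?_getD, List.getElem?_map]
  cases t[y.toNat]? with
  | none => simp
  | some r => simp [List.map_set]

theorem pvMapT_px (f : Int → Int) (t : List (List Int)) (x y c : Int) :
    pvMapT f (pvPx t x y c) = pvPx (pvMapT f t) x y (f c) := by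
  unfold pvPx; split_ifs <;> simp [pvMapT_set2]

theorem pvFoldl_comm {ι : Type} (m : List (List Int) → List (List Int))
    (step step' : List (List Int) → ι → List (List Int))
    (h : ∀ t i, m (step t i) = step' (m t) i) :
    ∀ (xs : List ι) (t : List (List Int)), m (xs.foldl step t) = xs.foldl step' (m t) := by
  intro xs
  induction xs with
  | nil => intro t; rfl
  | cons a l ih => intro t; simp [List.foldl_cons, ih, h]

theorem pvSubst_blank (c1 c2 c3 : Int) : pvMapT (pvSubst c1 c2 c3) pvBlank = pvBlank := by
  simp [pvMapT, pvBlank, pvSubst]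

theorem pvSubst_blankB (c1 c2 c3 : Int) : pvMapT (pvSubst c1 c2 c3) pvBlankB = pvBlankB := by
  simp [pvMapT, pvBlankB, pvSubst]

theorem pvSubst_pixStep (c1 c2 c3 y : Int) (t : List (List Int)) (x : Int) :
    pvMapT (pvSubst c1 c2 c3) (pvPixStep 2 3 4 y t x) =
      pvPixStep c1 c2 c3 y (pvMapT (pvSubst c1 c2 c3) t) x := by
  unfold pvPixStep
  split_ifs <;> simp_all [pvMapT_set2, pvSubst]

theorem pvSubst_rayStep (c1 c2 c3 : Int) (t : List (List Int)) (i : Int) :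
    pvMapT (pvSubst c1 c2 c3) (pvRayStep 2 t i) =
      pvRayStep c1 (pvMapT (pvSubst c1 c2 c3) t) i := by
  unfold pvRayStep
  simp [pvMapT_px]
  norm_num [pvSubst]

theorem pvSubst_sparkStep (c1 c2 c3 : Int) (t : List (List Int)) (i : Int) :
    pvMapT (pvSubst c1 c2 c3) (pvSparkStep 3 t i) =
      pvSparkStep c2 (pvMapT (pvSubst c1 c2 c3) t) i := by
  unfold pvSparkStep
  simp [pvMapT_px]
  norm_num [pvSubst]

theorem pvSubst_A (c1 c2 c3 : Int) :
    pvMapT (pvSubst c1 c2 c3) (explosion_tile 2 3 4) = explosion_tile c1 c2 c3 := by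
  have hrow : ∀ (t : List (List Int)) (y : Int),
      pvMapT (pvSubst c1 c2 c3) ((PySem.List.pyRange 0 32 1).foldl (pvPixStep 2 3 4 y) t) =
        (PySem.List.pyRange 0 32 1).foldl (pvPixStep c1 c2 c3 y) (pvMapT (pvSubst c1 c2 c3) t) :=
    fun t y => pvFoldl_comm _ _ _ (pvSubst_pixStep c1 c2 c3 y) _ t
  unfold explosion_tile
  rw [pvFoldl_comm (pvMapT (pvSubst c1 c2 c3)) (pvSparkStep 3) (pvSparkStep c2)
      (pvSubst_sparkStep c1 c2 c3),
    pvFoldl_comm (pvMapT (pvSubst c1 c2 c3)) (pvRayStep 2) (pvRayStep c1)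
      (pvSubst_rayStep c1 c2 c3),
    pvFoldl_comm (pvMapT (pvSubst c1 c2 c3))
      (fun t y => (PySem.List.pyRange 0 32 1).foldl (pvPixStep 2 3 4 y) t)
      (fun t y => (PySem.List.pyRange 0 32 1).foldl (pvPixStep c1 c2 c3 y) t)
      hrow, pvSubst_blank]

theorem pvSubst_diskStep (c1 c2 c3 cx cy r2 cd y : Int) (t : List (List Int)) (x : Int) :
    pvMapT (pvSubst c1 c2 c3) (pvDiskStep cx cy r2 cd y t x) =
      pvDiskStep cx cy r2 (pvSubst c1 c2 c3 cd) y (pvMapT (pvSubst c1 c2 c3) t) x := by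
  unfold pvDiskStep
  split_ifs <;> simp [pvMapT_set2]

theorem pvSubst_disk (c1 c2 c3 cx cy r2 cd : Int) (t : List (List Int)) :
    pvMapT (pvSubst c1 c2 c3) (pvFilledDisk t cx cy r2 cd) =
      pvFilledDisk (pvMapT (pvSubst c1 c2 c3) t) cx cy r2 (pvSubst c1 c2 c3 cd) := by
  have hrow : ∀ (t : List (List Int)) (y : Int),
      pvMapT (pvSubst c1 c2 c3) ((PySem.List.pyRange 0 32 1).foldl (pvDiskStep cx cy r2 cd y) t) =
        (PySem.List.pyRange 0 32 1).foldl
          (pvDiskStep cx cy r2 (pvSubst c1 c2 c3 cd) y) (pvMapT (pvSubst c1 c2 c3) t) :=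
    fun t y => pvFoldl_comm _ _ _ (pvSubst_diskStep c1 c2 c3 cx cy r2 cd y) _ t
  unfold pvFilledDisk
  rw [pvFoldl_comm (pvMapT (pvSubst c1 c2 c3))
    (fun t y => (PySem.List.pyRange 0 32 1).foldl (pvDiskStep cx cy r2 cd y) t)
    (fun t y => (PySem.List.pyRange 0 32 1).foldl (pvDiskStep cx cy r2 (pvSubst c1 c2 c3 cd) y) t)
    hrow]

theorem pvSubst_rayStepB (c1 c2 c3 : Int) (t : List (List Int)) (i : Int) :
    pvMapT (pvSubst c1 c2 c3) (pvRayStepB 2 t i) =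
      pvRayStepB c1 (pvMapT (pvSubst c1 c2 c3) t) i := by
  unfold pvRayStepB
  simp [List.foldl_cons, pvMapT_px]
  norm_num [pvSubst]

theorem pvSubst_sparkStepB (c1 c2 c3 : Int) (t : List (List Int)) (i : Int) :
    pvMapT (pvSubst c1 c2 c3) (pvSparkStepB 3 t i) =
      pvSparkStepB c2 (pvMapT (pvSubst c1 c2 c3) t) i := by
  unfold pvSparkStepB
  simp [List.foldl_cons, pvMapT_px]
  norm_num [pvSubst]

-- unfolds the four-element literal fold of B's main ring pass
theorem pvFoldl_four (a1 b1 a2 b2 a3 b3 a4 b4 : Int) (t : List (List Int)) :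
    ([(a1, b1), (a2, b2), (a3, b3), (a4, b4)]).foldl
        (fun t rc => pvFilledDisk t 15 15 rc.1 rc.2) t =
      pvFilledDisk (pvFilledDisk (pvFilledDisk (pvFilledDisk t 15 15 a1 b1) 15 15 a2 b2)
        15 15 a3 b3) 15 15 a4 b4 := rfl

theorem pvSubst_B (c1 c2 c3 : Int) :
    pvMapT (pvSubst c1 c2 c3) (explosion_tile_alt 2 3 4) = explosion_tile_alt c1 c2 c3 := by
  unfold explosion_tile_alt
  rw [pvFoldl_comm (pvMapT (pvSubst c1 c2 c3)) (pvSparkStepB 3) (pvSparkStepB c2)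
      (pvSubst_sparkStepB c1 c2 c3),
    pvFoldl_comm (pvMapT (pvSubst c1 c2 c3)) (pvRayStepB 2) (pvRayStepB c1)
      (pvSubst_rayStepB c1 c2 c3)]
  rw [pvFoldl_four, pvFoldl_four, pvSubst_disk, pvSubst_disk, pvSubst_disk, pvSubst_disk,
    pvSubst_blankB]
  norm_num [pvSubst]

set_option maxRecDepth 40000 in
set_option maxHeartbeats 2000000 in
theorem pv_code_tiles_eq : explosion_tile 2 3 4 = explosion_tile_alt 2 3 4 := by decide

-- ===== VERDICT (by name: the statement is the Claim_ definition above) =====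
theorem explosion_tile_spec : Claim_equal_explosion_tile := by
  intro c1 c2 c3 _
  unfold Spec_explosion_tile
  rw [← pvSubst_A, pv_code_tiles_eq, pvSubst_B]
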